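-- pv_equiv track=rewrite | github.com/MrBrantCode/unitest_baseline | mut_generate/mist_train_taco/taco_2726/solution.py | calculate_total_score
-- ===== SOURCE A (Python) =====
-- def calculate_total_score(N):
--     LARGE = 10**9 + 7
--
--     def ex_euclid(x, y):
--         (c0, c1) = (x, y)
--         (a0, a1) = (1, 0)
--         (b0, b1) = (0, 1)
--         while c1 != 0:
--             m = c0 % c1
--             q = c0 // c1
--             (c0, c1) = (c1, m)
--             (a0, a1) = (a1, a0 - q * a1)
--             (b0, b1) = (b1, b0 - q * b1)
--         return (c0, a0, b0)
--
--     N -= 1  # Adjust N to represent the number of machines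
--
--     fac_list = [1] * (N + 1)
--     fac = 1
--     for i in range(1, N + 1):
--         fac = fac * i % LARGE
--         fac_list[i] = fac
--
--     fac_inv_list = [1] * (N + 1)
--     for i in range(N + 1):
--         fac_inv_list[i] = pow(fac_list[i], LARGE - 2, LARGE)
--
--     def nCr(n, r):
--         return fac_list[n] * fac_inv_list[r] % LARGE * fac_inv_list[n - r] % LARGE
--
--     pat = 0
--     score = 0
--     for k in range(N + 1):
--         if k - 1 >= N - k:
--             res = fac_list[k - 1] * fac_list[k] % LARGE * fac_inv_list[k - 1 - N + k] % LARGE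
--             score = (score + (res - pat) * k) % LARGE
--             pat = res
--
--     return score
-- ===== SOURCE B (Python) =====
-- def calculate_total_score(N):
--     MOD = 10**9 + 7
--     n = N - 1  # number of machines
--     if n < 1:
--         return 0
--     fac = [1] * (n + 1)
--     for i in range(1, n + 1):
--         fac[i] = fac[i - 1] * i % MOD
--
--     def res(k):
--         # fac[k-1] * fac[k] / fac[2k-1-n]  (mod MOD)
--         return fac[k - 1] * fac[k] % MOD * pow(fac[2 * k - 1 - n], MOD - 2, MOD) % MOD
--
--     k0 = (n + 2) // 2  # smallest k with k-1 >= n-k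
--     # Abel-summed (telescoped) form of the running-difference accumulation
--     return (n * res(n) - sum(res(k) for k in range(k0, n))) % MOD
-- ===== Notes on version B (the rewrite author's own statement) =====
-- stated objective: faster
-- what changed: B replaces the guarded running-difference accumulation over the full index range by the telescoped closed form n*res(n) minus the sum of res(k) over the explicit half range, computing each modular inverse inline only where needed, which halves the number of modular-exponentiation calls and drops the inverse-factorial table.
import Mathlib
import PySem

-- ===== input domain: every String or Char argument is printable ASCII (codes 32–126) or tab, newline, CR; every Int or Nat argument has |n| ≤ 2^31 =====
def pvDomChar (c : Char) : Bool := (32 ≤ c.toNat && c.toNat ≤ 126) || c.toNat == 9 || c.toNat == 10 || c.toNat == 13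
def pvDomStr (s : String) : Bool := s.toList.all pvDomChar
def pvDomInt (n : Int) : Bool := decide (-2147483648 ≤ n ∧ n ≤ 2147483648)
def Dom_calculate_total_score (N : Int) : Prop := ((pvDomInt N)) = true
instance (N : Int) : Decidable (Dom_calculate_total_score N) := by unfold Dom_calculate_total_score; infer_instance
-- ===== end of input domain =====

-- B: telescoped (Abel-summed) half-range sum with inline modular inverses instead of A's
-- guarded running-difference scan with a full inverse-factorial table (constant-factor speed-up).


-- shared helper: Python's three-argument pow(b, e, m) (0 < m), as binary modular
-- exponentiation; proved equal to PySem's primitive in pvPowMod_eq below (PySem.Int.powMod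
-- is defined as (b ^ e) % m and cannot be evaluated at exponent 10^9+5)
def pvPowMod (b : Int) (e : Nat) (m : Int) : Int :=
  if _h : e = 0 then PySem.Int.mod 1 m
  else
    let r := pvPowMod (PySem.Int.mod (b * b) m) (e / 2) m
    if e % 2 = 1 then PySem.Int.mod (r * b) m else r
termination_by e
decreasing_by omega

-- ===== PORT A =====
-- literal port of A: build fac_list in place, then fac_inv_list via pow(_, LARGE-2, LARGE)
-- on every index, then the guarded pat/score loop over range(N+1).
def calculate_total_score (N0 : Int) : Int :=
  let LARGE : Int := 10 ^ 9 + 7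
  let N := N0 - 1
  -- the Python lists mutated in place are modelled as Arrays (O(1) set/get); every
  -- index used below is nonnegative and in range (i, k come from the stated ranges and
  -- the loop guard gives k ≥ 1), so .toNat/setIfInBounds/getD are exact here
  let st1 : Array Int × Int :=
    (PySem.List.pyRange 1 (N + 1) 1).foldl
      (fun st i =>
        let fac := PySem.Int.mod (st.2 * i) LARGE
        (st.1.setIfInBounds i.toNat fac, fac))
      (Array.replicate (N + 1).toNat 1, 1)
  let fac_list := st1.1
  let fac_inv_list :=
    (PySem.List.pyRange 0 (N + 1) 1).foldl
      (fun acc i =>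
        acc.setIfInBounds i.toNat
          (pvPowMod (fac_list.getD i.toNat 0) (10 ^ 9 + 5) LARGE))
      (Array.replicate (N + 1).toNat 1)
  let st2 : Int × Int :=
    (PySem.List.pyRange 0 (N + 1) 1).foldl
      (fun st k =>
        if k - 1 ≥ N - k then
          let res := PySem.Int.mod
            (PySem.Int.mod (fac_list.getD (k - 1).toNat 0 * fac_list.getD k.toNat 0) LARGE
              * fac_inv_list.getD (k - 1 - N + k).toNat 0) LARGE
          (res, PySem.Int.mod (st.2 + (res - st.1) * k) LARGE)
        else st)
      (0, 0)
  st2.2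

-- ===== PORT B =====
-- port of B: factorial table, then the telescoped sum over the half range [ (n+2)//2, n ).
def calculate_total_score_alt (N0 : Int) : Int :=
  let MOD : Int := 10 ^ 9 + 7
  let n := N0 - 1
  if n < 1 then 0
  else
    -- the Python list is modelled as an Array (O(1) set/get); all indices below are
    -- nonnegative and in range (i ≥ 1, and k0 ≤ k ≤ n gives 0 ≤ k-1, 0 ≤ 2k-1-n ≤ n)
    let fac :=
      (PySem.List.pyRange 1 (n + 1) 1).foldl
        (fun (acc : Array Int) i =>
          acc.setIfInBounds i.toNat (PySem.Int.mod (acc.getD (i - 1).toNat 0 * i) MOD))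
        (Array.replicate (n + 1).toNat 1)
    let res := fun (k : Int) =>
      PySem.Int.mod
        (PySem.Int.mod (fac.getD (k - 1).toNat 0 * fac.getD k.toNat 0) MOD
          * pvPowMod (fac.getD (2 * k - 1 - n).toNat 0) (10 ^ 9 + 5) MOD) MOD
    let k0 := PySem.Int.floordiv (n + 2) 2
    PySem.Int.mod (n * res n - ((PySem.List.pyRange k0 n 1).map res).sum) MOD

-- ===== PRECONDITION & SPEC =====
def Spec_calculate_total_score (N : Int) (out : Int) : Prop := out = calculate_total_score_alt N
instance (N : Int) (out : Int) : Decidable (Spec_calculate_total_score N out) := by unfold Spec_calculate_total_score; infer_instance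

-- ===== CLAIM (what is proved, stated in full; the proofs are below) =====
def Claim_equal_calculate_total_score : Prop := ∀ (N : Int), Dom_calculate_total_score N → Spec_calculate_total_score N (calculate_total_score N)

-- ===== LEMMAS AND PROOFS =====

def pvM : Int := 10 ^ 9 + 7
def pvE : Nat := 10 ^ 9 + 5

theorem pvPowMod_eq (b : Int) (e : Nat) (m : Int) (hm : 0 < m) :
    pvPowMod b e m = PySem.Int.powMod b e m := by
  rw [PySem.Int.powMod_eq, PySem.Int.mod_eq_emod_of_pos hm]
  induction e using Nat.strong_induction_on generalizing b with
  | _ e ih =>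
    rw [pvPowMod]
    by_cases h0 : e = 0
    · simp [h0, PySem.Int.mod_eq_emod_of_pos hm]
    · rw [dif_neg h0]
      simp only [PySem.Int.mod_eq_emod_of_pos hm]
      rw [ih (e / 2) (by omega) (b * b % m)]
      have h1 : Int.ModEq m (b * b % m) (b * b) := Int.emod_emod_of_dvd (b * b) dvd_rfl
      by_cases he : e % 2 = 1
      · rw [if_pos he]
        conv_rhs => rw [show e = 2 * (e / 2) + 1 by omega]
        rw [pow_succ, pow_mul, pow_two]
        have h2 : Int.ModEq m ((b * b % m) ^ (e / 2) % m) ((b * b) ^ (e / 2)) :=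
          (Int.emod_emod_of_dvd _ dvd_rfl).trans (h1.pow (e / 2))
        exact h2.mul_right b
      · rw [if_neg he]
        conv_rhs => rw [show e = 2 * (e / 2) by omega]
        rw [pow_mul, pow_two]
        exact h1.pow (e / 2)

theorem pv_arr_getD (xs : List Int) (i : Nat) (d : Int) : xs.toArray.getD i d = xs.getD i d := by
  unfold Array.getD
  split
  · next h => simp at h; simp [List.getD_eq_getElem?_getD, List.getElem?_eq_getElem h]
  · next h =>
    simp at h
    rw [List.getD_eq_getElem?_getD, List.getElem?_eq_none (by simpa using h)]; rfl

theorem pv_getD_pyGetD (xs : List Int) (i : Int) (h : 0 ≤ i) :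
    xs.toArray.getD i.toNat 0 = PySem.List.pyGetD xs i 0 := by
  rw [pv_arr_getD, PySem.List.pyGetD_of_nonneg _ _ h]

theorem pv_setIfInBounds_pySetD (xs : List Int) (i : Int) (v : Int) (h : 0 ≤ i) :
    xs.toArray.setIfInBounds i.toNat v = (PySem.List.pySetD xs i v).toArray := by
  rw [← Array.toList_inj]
  simp [PySem.List.pySetD_of_nonneg _ _ h]

-- canonical factorials mod 10^9+7
def pvF : Nat → Int
  | 0 => 1
  | j + 1 => PySem.Int.mod (pvF j * ((j : Int) + 1)) pvM

def pvFZ (i : Int) : Int := pvF i.toNat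
def pvG (j : Int) : Int := PySem.Int.powMod (pvFZ j) pvE pvM
def pvFacL (n : Int) : List Int := (PySem.List.pyRange 0 (n + 1) 1).map pvFZ
def pvInvL (n : Int) : List Int := (PySem.List.pyRange 0 (n + 1) 1).map pvG
def pvR (n k : Int) : Int :=
  PySem.Int.mod (PySem.Int.mod (pvFZ (k - 1) * pvFZ k) pvM * pvG (2 * k - 1 - n)) pvM

theorem pvFZ_succ (i : Int) (h : 0 ≤ i) :
    pvFZ (i + 1) = PySem.Int.mod (pvFZ i * (i + 1)) pvM := by
  unfold pvFZ
  have h1 : (i + 1).toNat = i.toNat + 1 := by omega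
  have h2 : ((i.toNat : Int)) = i := by omega
  rw [h1]
  show PySem.Int.mod (pvF i.toNat * ((i.toNat : Int) + 1)) pvM = _
  rw [h2]

theorem pv_set_boundary {α : Type} (xs ys : List α) (v : α) :
    (xs ++ ys).set xs.length v = xs ++ ys.set 0 v := by
  simp

theorem pv_foldl_id {α β : Type} (l : List α) (init : β) :
    l.foldl (fun st _ => st) init = init := by
  induction l <;> simp_all

-- A's factorial-building loop
theorem pv_facA (n : Int) (hn : 0 ≤ n) (m : Nat) (hm : (m : Int) ≤ n) :
    (PySem.List.pyRange 1 ((m : Int) + 1) 1).foldl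
      (fun (st : List Int × Int) i =>
        let fac := PySem.Int.mod (st.2 * i) pvM
        (PySem.List.pySetD st.1 i fac, fac))
      (List.replicate (n + 1).toNat 1, 1)
    = ((PySem.List.pyRange 0 ((m : Int) + 1) 1).map pvFZ ++ List.replicate (n - (m : Int)).toNat 1,
       pvFZ (m : Int)) := by
  induction m with
  | zero =>
    rw [PySem.List.pyRange_one_eq_nil (by omega)]
    have h2 : (n + 1).toNat = (n - 0).toNat + 1 := by omega
    have h3 : PySem.List.pyRange (0 : Int) 1 = [0] := by
      rw [show (1 : Int) = 0 + 1 by norm_num]; exact PySem.List.pyRange_one_singleton 0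
    simp [h2, h3, pvFZ, pvF, List.replicate_succ]
  | succ m ih =>
    have hm' : (m : Int) ≤ n := by push_cast at hm ⊢; omega
    rw [show ((m + 1 : Nat) : Int) + 1 = ((m : Int) + 1) + 1 from by push_cast; ring,
        PySem.List.pyRange_one_succ_right (by omega), List.foldl_append, ih hm']
    simp only [List.foldl_cons, List.foldl_nil]
    have hfz : PySem.Int.mod (pvFZ (m : Int) * ((m : Int) + 1)) pvM = pvFZ ((m : Int) + 1) :=
      (pvFZ_succ (m : Int) (by omega)).symm
    have hlen : ((PySem.List.pyRange 0 ((m : Int) + 1) 1).map pvFZ).length = m + 1 := by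
      simp [PySem.List.length_pyRange_one]
    have hrep : (n - (m : Int)).toNat = (n - ((m : Int) + 1)).toNat + 1 := by
      push_cast at hm; omega
    rw [PySem.List.pySetD_of_nonneg _ _ (by omega)]
    have htn : ((m : Int) + 1).toNat = m + 1 := by omega
    have hb := pv_set_boundary ((PySem.List.pyRange 0 ((m : Int) + 1) 1).map pvFZ)
      (List.replicate (n - (m : Int)).toNat (1 : Int))
      (PySem.Int.mod (pvFZ (m : Int) * ((m : Int) + 1)) pvM)
    rw [hlen] at hb
    rw [htn, hb, hrep, List.replicate_succ]
    simp only [List.set_cons_zero]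
    rw [Prod.mk.injEq]
    refine ⟨?_, ?_⟩
    · rw [PySem.List.pyRange_one_succ_right (a := 0) (b := (m : Int) + 1) (by omega),
          List.map_append]
      simp [hfz]
    · rw [hfz]; norm_cast

-- B's factorial-building loop
theorem pv_facB (n : Int) (hn : 0 ≤ n) (m : Nat) (hm : (m : Int) ≤ n) :
    (PySem.List.pyRange 1 ((m : Int) + 1) 1).foldl
      (fun (acc : List Int) i =>
        PySem.List.pySetD acc i (PySem.Int.mod (PySem.List.pyGetD acc (i - 1) 0 * i) pvM))
      (List.replicate (n + 1).toNat 1)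
    = (PySem.List.pyRange 0 ((m : Int) + 1) 1).map pvFZ ++ List.replicate (n - (m : Int)).toNat 1 := by
  induction m with
  | zero =>
    rw [PySem.List.pyRange_one_eq_nil (by omega)]
    have h2 : (n + 1).toNat = (n - 0).toNat + 1 := by omega
    have h3 : PySem.List.pyRange (0 : Int) 1 = [0] := by
      rw [show (1 : Int) = 0 + 1 by norm_num]; exact PySem.List.pyRange_one_singleton 0
    simp [h2, h3, pvFZ, pvF, List.replicate_succ]
  | succ m ih =>
    have hm' : (m : Int) ≤ n := by push_cast at hm ⊢; omega
    rw [show ((m + 1 : Nat) : Int) + 1 = ((m : Int) + 1) + 1 from by push_cast; ring,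
        PySem.List.pyRange_one_succ_right (by omega), List.foldl_append, ih hm']
    simp only [List.foldl_cons, List.foldl_nil]
    have hfz : PySem.Int.mod (pvFZ (m : Int) * ((m : Int) + 1)) pvM = pvFZ ((m : Int) + 1) :=
      (pvFZ_succ (m : Int) (by omega)).symm
    have hlen : ((PySem.List.pyRange 0 ((m : Int) + 1) 1).map pvFZ).length = m + 1 := by
      simp [PySem.List.length_pyRange_one]
    have hrep : (n - (m : Int)).toNat = (n - ((m : Int) + 1)).toNat + 1 := by
      push_cast at hm; omega
    have hget : PySem.List.pyGetD
        ((PySem.List.pyRange 0 ((m : Int) + 1) 1).map pvFZ ++ List.replicate (n - (m : Int)).toNat 1)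
        ((m : Int) + 1 - 1) 0 = pvFZ (m : Int) := by
      rw [show (m : Int) + 1 - 1 = ((m : Nat) : Int) by ring, PySem.List.pyGetD_natCast]
      rw [List.getD_eq_getElem?_getD, List.getElem?_append_left (by rw [hlen]; omega)]
      simp
    rw [hget, hfz, PySem.List.pySetD_of_nonneg _ _ (by omega)]
    have htn : ((m : Int) + 1).toNat = m + 1 := by omega
    have hb := pv_set_boundary ((PySem.List.pyRange 0 ((m : Int) + 1) 1).map pvFZ)
      (List.replicate (n - (m : Int)).toNat (1 : Int)) (pvFZ ((m : Int) + 1))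
    rw [hlen] at hb
    rw [htn, hb, hrep, List.replicate_succ]
    simp only [List.set_cons_zero]
    rw [PySem.List.pyRange_one_succ_right (a := 0) (b := (m : Int) + 1) (by omega),
        List.map_append]
    simp

-- lookups in the canonical lists
theorem pv_facL_get (n i : Int) (h0 : 0 ≤ i) (h1 : i ≤ n) :
    PySem.List.pyGetD (pvFacL n) i 0 = pvFZ i := by
  unfold pvFacL
  exact PySem.List.pyGetD_map_pyRange_of_nonneg pvFZ (n + 1) i 0 h0 (by omega)

theorem pv_invL_get (n i : Int) (h0 : 0 ≤ i) (h1 : i ≤ n) :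
    PySem.List.pyGetD (pvInvL n) i 0 = pvG i := by
  unfold pvInvL
  exact PySem.List.pyGetD_map_pyRange_of_nonneg pvG (n + 1) i 0 h0 (by omega)

-- A's inverse-factorial loop
theorem pv_invA (n : Int) (m : Nat) (hm : (m : Int) ≤ n + 1) :
    (PySem.List.pyRange 0 (m : Int) 1).foldl
      (fun (acc : List Int) i =>
        PySem.List.pySetD acc i
          (PySem.Int.powMod (PySem.List.pyGetD (pvFacL n) i 0) pvE pvM))
      (List.replicate (n + 1).toNat 1)
    = (PySem.List.pyRange 0 (m : Int) 1).map pvG ++ List.replicate (n + 1 - (m : Int)).toNat 1 := by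
  induction m with
  | zero =>
    rw [PySem.List.pyRange_one_eq_nil (by omega)]
    simp
  | succ m ih =>
    have hm' : (m : Int) ≤ n + 1 := by push_cast at hm ⊢; omega
    rw [show ((m + 1 : Nat) : Int) = (m : Int) + 1 from by push_cast; ring,
        PySem.List.pyRange_one_succ_right (a := 0) (b := (m : Int)) (by omega),
        List.foldl_append, ih hm']
    simp only [List.foldl_cons, List.foldl_nil]
    have hget : PySem.List.pyGetD (pvFacL n) (m : Int) 0 = pvFZ (m : Int) :=
      pv_facL_get n (m : Int) (by omega) (by push_cast at hm; omega)
    rw [hget, PySem.List.pySetD_of_nonneg _ _ (by omega)]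
    have hlen : ((PySem.List.pyRange 0 (m : Int) 1).map pvG).length = m := by
      simp [PySem.List.length_pyRange_one]
    have hrep : (n + 1 - (m : Int)).toNat = (n + 1 - ((m : Int) + 1)).toNat + 1 := by
      push_cast at hm; omega
    have hb := pv_set_boundary ((PySem.List.pyRange 0 (m : Int) 1).map pvG)
      (List.replicate (n + 1 - (m : Int)).toNat (1 : Int))
      (PySem.Int.powMod (pvFZ (m : Int)) pvE pvM)
    rw [hlen] at hb
    rw [show ((m : Int)).toNat = m by omega, hb, hrep, List.replicate_succ]
    simp only [List.set_cons_zero]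
    simp [pvG]

-- bounds for k0 = (n+2)//2
theorem pv_k0_bounds (n : Int) :
    n + 1 ≤ 2 * PySem.Int.floordiv (n + 2) 2 ∧ 2 * PySem.Int.floordiv (n + 2) 2 ≤ n + 2 := by
  have h := PySem.Int.floordiv_mul_add_mod (n + 2) 2
  have h1 := PySem.Int.mod_nonneg (n + 2) (b := 2) (by omega)
  have h2 := PySem.Int.mod_lt (n + 2) (b := 2) (by omega)
  omega

-- A's score loop, unguarded step, telescoped
theorem pv_score_loop (n : Int) (_hn : 1 ≤ n) (j : Nat)
    (hj : PySem.Int.floordiv (n + 2) 2 + (j : Int) ≤ n) :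
    (PySem.List.pyRange (PySem.Int.floordiv (n + 2) 2)
        (PySem.Int.floordiv (n + 2) 2 + (j : Int) + 1) 1).foldl
      (fun (st : Int × Int) k => (pvR n k, PySem.Int.mod (st.2 + (pvR n k - st.1) * k) pvM))
      (0, 0)
    = (pvR n (PySem.Int.floordiv (n + 2) 2 + (j : Int)),
       PySem.Int.mod
         ((PySem.Int.floordiv (n + 2) 2 + (j : Int)) * pvR n (PySem.Int.floordiv (n + 2) 2 + (j : Int))
           - ((PySem.List.pyRange (PySem.Int.floordiv (n + 2) 2)
                 (PySem.Int.floordiv (n + 2) 2 + (j : Int)) 1).map (pvR n)).sum) pvM) := by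
  have hMpos : (0 : Int) < pvM := by unfold pvM; norm_num
  induction j with
  | zero =>
    simp only [Nat.cast_zero, add_zero]
    rw [PySem.List.pyRange_one_singleton, PySem.List.pyRange_one_eq_nil (by omega)]
    simp only [List.foldl_cons, List.foldl_nil, List.map_nil, List.sum_nil]
    rw [Prod.mk.injEq]
    refine ⟨by ring_nf, ?_⟩
    congr 1; ring
  | succ j ih =>
    have hj' : PySem.Int.floordiv (n + 2) 2 + (j : Int) ≤ n := by push_cast at hj ⊢; omega
    rw [show PySem.Int.floordiv (n + 2) 2 + ((j + 1 : Nat) : Int) + 1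
          = (PySem.Int.floordiv (n + 2) 2 + (j : Int) + 1) + 1 from by push_cast; ring,
        PySem.List.pyRange_one_succ_right (by omega), List.foldl_append, ih hj']
    simp only [List.foldl_cons, List.foldl_nil]
    rw [Prod.mk.injEq]
    refine ⟨by push_cast; ring_nf, ?_⟩
    rw [show PySem.Int.floordiv (n + 2) 2 + ((j + 1 : Nat) : Int)
          = PySem.Int.floordiv (n + 2) 2 + (j : Int) + 1 from by push_cast; ring,
        PySem.List.pyRange_one_succ_right (a := PySem.Int.floordiv (n + 2) 2) (by omega),
        List.map_append, List.sum_append]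
    rw [PySem.Int.mod_eq_emod_of_pos hMpos, PySem.Int.mod_eq_emod_of_pos hMpos,
        PySem.Int.mod_eq_emod_of_pos hMpos, Int.emod_add_emod]
    simp only [List.map_cons, List.map_nil, List.sum_cons, List.sum_nil]
    congr 1; ring

-- cleaned-up corollaries of the loop invariants
theorem pv_facA' (n : Int) (hn : 1 ≤ n) :
    (PySem.List.pyRange 1 (n + 1) 1).foldl
      (fun (st : List Int × Int) i =>
        let fac := PySem.Int.mod (st.2 * i) pvM
        (PySem.List.pySetD st.1 i fac, fac))
      (List.replicate (n + 1).toNat 1, 1)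
    = (pvFacL n, pvFZ n) := by
  have hm : ((n.toNat : Nat) : Int) = n := by omega
  have h := pv_facA n (by omega) n.toNat (by omega)
  rw [hm] at h
  simpa [pvFacL, show (n - n).toNat = 0 by omega] using h

theorem pv_facB' (n : Int) (_hn : 1 ≤ n) :
    (PySem.List.pyRange 1 (n + 1) 1).foldl
      (fun (acc : List Int) i =>
        PySem.List.pySetD acc i (PySem.Int.mod (PySem.List.pyGetD acc (i - 1) 0 * i) pvM))
      (List.replicate (n + 1).toNat 1)
    = pvFacL n := by
  have hm : ((n.toNat : Nat) : Int) = n := by omega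
  have h := pv_facB n (by omega) n.toNat (by omega)
  rw [hm] at h
  simpa [pvFacL, show (n - n).toNat = 0 by omega] using h

theorem pv_invA' (n : Int) (hn : 1 ≤ n) :
    (PySem.List.pyRange 0 (n + 1) 1).foldl
      (fun (acc : List Int) i =>
        PySem.List.pySetD acc i
          (PySem.Int.powMod (PySem.List.pyGetD (pvFacL n) i 0) pvE pvM))
      (List.replicate (n + 1).toNat 1)
    = pvInvL n := by
  have hm : (((n + 1).toNat : Nat) : Int) = n + 1 := by omega
  have h := pv_invA n (n + 1).toNat (by omega)
  rw [hm] at h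
  simpa [pvInvL, show (n + 1 - (n + 1)).toNat = 0 by omega] using h

theorem pv_score' (n : Int) (hn : 1 ≤ n) :
    (PySem.List.pyRange (PySem.Int.floordiv (n + 2) 2) (n + 1) 1).foldl
      (fun (st : Int × Int) k => (pvR n k, PySem.Int.mod (st.2 + (pvR n k - st.1) * k) pvM))
      (0, 0)
    = (pvR n n,
       PySem.Int.mod
         (n * pvR n n
           - ((PySem.List.pyRange (PySem.Int.floordiv (n + 2) 2) n 1).map (pvR n)).sum) pvM) := by
  have hk := pv_k0_bounds n
  have hj : PySem.Int.floordiv (n + 2) 2 + ((n - PySem.Int.floordiv (n + 2) 2).toNat : Int) = n := by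
    omega
  have h := pv_score_loop n hn (n - PySem.Int.floordiv (n + 2) 2).toNat (by omega)
  rw [hj] at h
  exact h

-- Array/List correspondences for the ports' in-place loops
theorem pv_foldA_arr (l : List Int) (hl : ∀ x ∈ l, 0 ≤ x) (xs : List Int) (c : Int) :
    l.foldl (fun (st : Array Int × Int) i =>
        (st.1.setIfInBounds i.toNat (PySem.Int.mod (st.2 * i) pvM), PySem.Int.mod (st.2 * i) pvM))
      (xs.toArray, c)
    = ((l.foldl (fun (st : List Int × Int) i =>
          let fac := PySem.Int.mod (st.2 * i) pvM
          (PySem.List.pySetD st.1 i fac, fac)) (xs, c)).1.toArray,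
       (l.foldl (fun (st : List Int × Int) i =>
          let fac := PySem.Int.mod (st.2 * i) pvM
          (PySem.List.pySetD st.1 i fac, fac)) (xs, c)).2) := by
  induction l generalizing xs c with
  | nil => simp
  | cons a t ih =>
    simp only [List.foldl_cons]
    rw [pv_setIfInBounds_pySetD _ _ _ (hl a (by simp))]
    exact ih (fun x hx => hl x (by simp [hx])) _ _

theorem pv_foldB_arr (l : List Int) (hl : ∀ x ∈ l, 1 ≤ x) (xs : List Int) :
    l.foldl (fun (acc : Array Int) i =>
        acc.setIfInBounds i.toNat (PySem.Int.mod (acc.getD (i - 1).toNat 0 * i) pvM)) xs.toArray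
    = (l.foldl (fun (acc : List Int) i =>
        PySem.List.pySetD acc i (PySem.Int.mod (PySem.List.pyGetD acc (i - 1) 0 * i) pvM))
        xs).toArray := by
  induction l generalizing xs with
  | nil => simp
  | cons a t ih =>
    simp only [List.foldl_cons]
    rw [pv_getD_pyGetD _ _ (by have := hl a (by simp); omega),
        pv_setIfInBounds_pySetD _ _ _ (by have := hl a (by simp); omega)]
    exact ih (fun x hx => hl x (by simp [hx])) _

theorem pv_foldI_arr (n : Int) (l : List Int) (hl : ∀ x ∈ l, 0 ≤ x) (xs : List Int) :
    l.foldl (fun (acc : Array Int) i =>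
        acc.setIfInBounds i.toNat
          (PySem.Int.powMod ((pvFacL n).toArray.getD i.toNat 0) pvE pvM)) xs.toArray
    = (l.foldl (fun (acc : List Int) i =>
        PySem.List.pySetD acc i
          (PySem.Int.powMod (PySem.List.pyGetD (pvFacL n) i 0) pvE pvM)) xs).toArray := by
  induction l generalizing xs with
  | nil => simp
  | cons a t ih =>
    simp only [List.foldl_cons]
    rw [pv_getD_pyGetD _ _ (hl a (by simp)),
        pv_setIfInBounds_pySetD _ _ _ (hl a (by simp))]
    exact ih (fun x hx => hl x (by simp [hx])) _

-- ===== VERDICT (by name: the statement is the Claim_ definition above) =====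
theorem calculate_total_score_spec : Claim_equal_calculate_total_score := by
  intro N0 _
  unfold Spec_calculate_total_score calculate_total_score calculate_total_score_alt
  have hM : (10 : Int) ^ 9 + 7 = pvM := rfl
  have hE : (10 ^ 9 + 5 : Nat) = pvE := rfl
  rw [hM, hE]
  have hP : ∀ (b : Int) (e : Nat), pvPowMod b e pvM = PySem.Int.powMod b e pvM :=
    fun b e => pvPowMod_eq b e pvM (by norm_num [pvM])
  simp only [hP]
  rw [show Array.replicate (N0 - 1 + 1).toNat (1 : Int)
        = (List.replicate (N0 - 1 + 1).toNat 1).toArray from by simp]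
  by_cases hc : N0 - 1 < 1
  · rw [if_pos hc]
    rw [PySem.List.foldl_congr_mem _ _ (fun (st : Int × Int) _ => st) _ ?side, pv_foldl_id]
    case side =>
      intro acc k hk
      rw [PySem.List.mem_pyRange_one] at hk
      rw [if_neg (by omega)]
  · rw [if_neg hc]
    have hn : 1 ≤ N0 - 1 := by omega
    have hk := pv_k0_bounds (N0 - 1)
    rw [pv_foldA_arr _ (fun x hx => by rw [PySem.List.mem_pyRange_one] at hx; omega) _ _,
        pv_facA' (N0 - 1) hn]
    simp only []
    rw [pv_foldI_arr (N0 - 1) _ (fun x hx => by rw [PySem.List.mem_pyRange_one] at hx; omega) _,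
        pv_invA' (N0 - 1) hn,
        pv_foldB_arr _ (fun x hx => by rw [PySem.List.mem_pyRange_one] at hx; omega) _,
        pv_facB' (N0 - 1) hn]
    rw [PySem.List.pyRange_one_append 0 (PySem.Int.floordiv (N0 - 1 + 2) 2) (N0 - 1 + 1)
          (by omega) (by omega),
        List.foldl_append]
    rw [PySem.List.foldl_congr_mem
          (PySem.List.pyRange 0 (PySem.Int.floordiv (N0 - 1 + 2) 2) 1)
          _ (fun (st : Int × Int) _ => st) _ ?pre, pv_foldl_id]
    case pre =>
      intro acc k hk
      rw [PySem.List.mem_pyRange_one] at hk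
      rw [if_neg (by omega)]
    rw [PySem.List.foldl_congr_mem
          (PySem.List.pyRange (PySem.Int.floordiv (N0 - 1 + 2) 2) (N0 - 1 + 1) 1) _
          (fun (st : Int × Int) k => (pvR (N0 - 1) k, PySem.Int.mod (st.2 + (pvR (N0 - 1) k - st.1) * k) pvM))
          _ ?main]
    case main =>
      intro acc k hk
      rw [PySem.List.mem_pyRange_one] at hk
      rw [if_pos (by omega)]
      simp only []
      rw [pv_getD_pyGetD _ _ (by omega), pv_getD_pyGetD _ _ (by omega),
          pv_getD_pyGetD _ _ (by omega),
          pv_facL_get _ _ (by omega) (by omega), pv_facL_get _ _ (by omega) (by omega),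
          pv_invL_get _ _ (by omega) (by omega),
          show k - 1 - (N0 - 1) + k = 2 * k - 1 - (N0 - 1) by ring]
      rfl
    rw [pv_score' (N0 - 1) hn]
    simp only []
    congr 1
    congr 1
    · congr 1
      rw [pv_getD_pyGetD _ _ (by omega), pv_getD_pyGetD _ _ (by omega),
          pv_getD_pyGetD _ _ (by omega),
          pv_facL_get _ _ (by omega) (by omega), pv_facL_get _ _ (by omega) (by omega),
          pv_facL_get _ _ (by omega) (by omega)]
      rfl
    · congr 1
      apply List.map_congr_left
      intro k hk
      rw [PySem.List.mem_pyRange_one] at hk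
      rw [pv_getD_pyGetD _ _ (by omega), pv_getD_pyGetD _ _ (by omega),
          pv_getD_pyGetD _ _ (by omega),
          pv_facL_get _ _ (by omega) (by omega), pv_facL_get _ _ (by omega) (by omega),
          pv_facL_get _ _ (by omega) (by omega)]
      rfl
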